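-- pv_equiv track=rewrite | github.com/okk-hub/homework_frenchwine | project_gdp_visualizatioin.py | reconcile_countries_by_name
-- ===== SOURCE A (Python) =====
-- def reconcile_countries_by_name(plot_countries, gdp_countries):
--     """
--     输入参数:
--     plot_countries: 绘图库国家代码数据，字典格式，其中键为绘图库国家代码，值为对应的具体国名
--     gdp_countries:世行各国数据，嵌套字典格式，其中外部字典的键为世行国家代码，值为该国在世行文件中的行数据（字典格式)
--
--     输出：
--     返回元组格式，包括一个字典和一个集合。其中字典内容为在世行有GDP数据的绘图库国家信息（键为绘图库各国家代码，值为对应的具体国名),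
--     集合内容为在世行无GDP数据的绘图库国家代码
--     """
--     list1=[]
--     list2=[]
--     table={}
--     basket=set()
--     result_list=[]
--
--     for plot_key in plot_countries :
--         list1.append(plot_key)
--     for gdp_key in gdp_countries :
--         list2.append(gdp_key)
--     for check_key in list1:
--         if check_key in list2 :
--             table[check_key]=plot_countries[check_key]
--         else:
--             basket.add(check_key)
--     result_list.append(table)
--     result_list.append(basket)
--     result_tup=tuple(result_list)
--     return result_tup
-- ===== SOURCE B (Python) =====
-- def reconcile_countries_by_name(plot_countries, gdp_countries):
--     # Deletion-based partition: copy the plot dict, delete every key that the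
--     # GDP data mentions; whatever survives is exactly the missing set, and the
--     # table is the complement of the survivors within plot_countries.
--     remaining = dict(plot_countries)
--     for code in gdp_countries:
--         remaining.pop(code, None)
--     table = {k: v for k, v in plot_countries.items() if k not in remaining}
--     return (table, set(remaining))
-- ===== Notes on version B (the rewrite author's own statement) =====
-- stated objective: faster
-- what changed: Instead of A's loop over plot keys with a linear membership scan of a gdp key list, B copies the plot dict once, loops over gdp_countries deleting each mentioned key, and reads the missing set off as whatever survives (the table is the complement filter), removing the inner scan entirely.
import Mathlib
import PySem

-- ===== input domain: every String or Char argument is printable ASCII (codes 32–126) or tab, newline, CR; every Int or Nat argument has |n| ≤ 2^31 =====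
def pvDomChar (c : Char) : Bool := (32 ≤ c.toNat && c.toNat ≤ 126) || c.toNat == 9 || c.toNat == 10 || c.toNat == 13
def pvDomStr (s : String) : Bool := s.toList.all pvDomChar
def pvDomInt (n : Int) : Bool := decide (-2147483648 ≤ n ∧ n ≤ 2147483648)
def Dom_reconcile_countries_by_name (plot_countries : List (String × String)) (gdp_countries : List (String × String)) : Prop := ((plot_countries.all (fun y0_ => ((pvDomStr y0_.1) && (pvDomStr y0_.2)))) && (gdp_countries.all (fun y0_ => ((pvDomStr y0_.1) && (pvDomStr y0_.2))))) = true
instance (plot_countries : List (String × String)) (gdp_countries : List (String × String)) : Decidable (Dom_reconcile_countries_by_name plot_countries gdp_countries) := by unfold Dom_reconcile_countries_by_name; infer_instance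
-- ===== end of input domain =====

-- B drops A's key-list copies and its membership-testing loop: it copies the plot dict
-- once, deletes every key gdp_countries mentions, and reads the missing set off as the
-- survivors (the table is the complement filter) — objective: faster (no inner scan).

-- ===== PORT A =====
def reconcile_countries_by_name (plot_countries : List (String × String)) (gdp_countries : List (String × String)) : (List (String × String)) × List String :=
  -- list1 / list2: the two key-copy loops
  let list1 := plot_countries.foldl (fun acc p => acc ++ [p.1]) []
  let list2 := gdp_countries.foldl (fun acc p => acc ++ [p.1]) []
  -- the check loop over list1, maintaining table (dict) and basket (set)
  let r := list1.foldl
    (fun (tb : PySem.Dict String String × PySem.Set String) check_key =>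
      if list2.contains check_key then
        (tb.1.insert check_key (((PySem.Dict.mk plot_countries).get? check_key).getD ""), tb.2)
      else
        (tb.1, PySem.Set.add tb.2 check_key))
    (PySem.Dict.empty, PySem.Set.empty)
  (r.1.items, r.2)

-- ===== PORT B =====
def reconcile_countries_by_name_alt (plot_countries : List (String × String)) (gdp_countries : List (String × String)) : (List (String × String)) × List String :=
  -- remaining = dict(plot_countries); for code in gdp_countries: remaining.pop(code, None)
  let remaining := gdp_countries.foldl
    (fun (d : PySem.Dict String String) p =>
      match d.pop? p.1 with       -- .pop(code, None): remove if present, else keep d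
      | some (_, d') => d'
      | none => d)
    (PySem.Dict.mk plot_countries)
  -- table = {k: v for k, v in plot_countries.items() if k not in remaining}
  let table := plot_countries.filter (fun p => !(remaining.contains p.1))
  (table, PySem.Set.ofList remaining.keys)    -- set(remaining)

-- ===== PRECONDITION & SPEC =====
-- Pre_ states only that the two association lists represent Python dicts: their keys are
-- distinct (a Python dict can never carry a duplicate key, so no Python input is excluded).
def Pre_reconcile_countries_by_name (plot_countries : List (String × String)) (gdp_countries : List (String × String)) : Prop :=
  (plot_countries.map Prod.fst).Nodup ∧ (gdp_countries.map Prod.fst).Nodup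
instance (plot_countries : List (String × String)) (gdp_countries : List (String × String)) : Decidable (Pre_reconcile_countries_by_name plot_countries gdp_countries) := by unfold Pre_reconcile_countries_by_name; infer_instance

def pvWitness_reconcile_countries_by_name : (List (String × String)) × (List (String × String)) :=
  ([("ab", "Albania"), ("cd", "Chad")], [("ab", "row")])

def Spec_reconcile_countries_by_name (plot_countries : List (String × String)) (gdp_countries : List (String × String)) (out : (List (String × String)) × List String) : Prop := out = reconcile_countries_by_name_alt plot_countries gdp_countries
instance (plot_countries : List (String × String)) (gdp_countries : List (String × String)) (out : (List (String × String)) × List String) : Decidable (Spec_reconcile_countries_by_name plot_countries gdp_countries out) := by unfold Spec_reconcile_countries_by_name; infer_instance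

-- ===== CLAIM (what is proved, stated in full; the proofs are below) =====
def Claim_equal_reconcile_countries_by_name : Prop := ∀ (plot_countries : List (String × String)) (gdp_countries : List (String × String)), Dom_reconcile_countries_by_name plot_countries gdp_countries → Pre_reconcile_countries_by_name plot_countries gdp_countries → Spec_reconcile_countries_by_name plot_countries gdp_countries (reconcile_countries_by_name plot_countries gdp_countries)

-- ===== LEMMAS AND PROOFS =====

-- A's key-copy loops are List.map Prod.fst
lemma keycopy_eq_map (L : List (String × String)) :
    L.foldl (fun acc p => acc ++ [p.1]) [] = L.map Prod.fst := by
  suffices h : ∀ acc, L.foldl (fun acc p => acc ++ [p.1]) acc = acc ++ L.map Prod.fst by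
    simpa using h []
  induction L with
  | nil => intro acc; simp
  | cons p t ih => intro acc; simp [List.foldl_cons, ih]

-- foldl congruence on members
lemma pv_foldl_congr {α β : Type} (l : List α) (f g : β → α → β) (b : β)
    (h : ∀ a ∈ l, ∀ s : β, f s a = g s a) : l.foldl f b = l.foldl g b := by
  induction l generalizing b with
  | nil => rfl
  | cons x xs ih => simp only [List.foldl_cons, h x (by simp)]; exact ih _ (fun a ha s => h a (by simp [ha]) s)

-- A's check loop, characterised: with fresh nodup keys it appends the filtered items
-- to the dict and the filtered-out keys to the set
lemma check_loop (c : String → Bool) :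
    ∀ (L : List (String × String)) (d : PySem.Dict String String) (s : PySem.Set String),
      (L.map Prod.fst).Nodup →
      (∀ k ∈ L.map Prod.fst, d.contains k = false) →
      (((L.map Prod.fst).foldl
        (fun (tb : PySem.Dict String String × PySem.Set String) k =>
          if c k then (tb.1.insert k (((PySem.Dict.mk L).get? k).getD ""), tb.2)
          else (tb.1, PySem.Set.add tb.2 k)) (d, s)).1.items
        = d.items ++ L.filter (fun p => c p.1))
      ∧ (((L.map Prod.fst).foldl
        (fun (tb : PySem.Dict String String × PySem.Set String) k =>
          if c k then (tb.1.insert k (((PySem.Dict.mk L).get? k).getD ""), tb.2)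
          else (tb.1, PySem.Set.add tb.2 k)) (d, s)).2
        = PySem.Set.update s ((L.map Prod.fst).filter (fun k => !c k))) := by
  intro L
  induction L with
  | nil => intro d s _ _; constructor <;> simp [PySem.Set.update]
  | cons q t ih =>
    obtain ⟨k0, v0⟩ := q
    intro d s hnd hfresh
    rw [List.map_cons] at hnd
    have hp1 : k0 ∉ t.map Prod.fst := (List.nodup_cons.mp hnd).1
    have hndt : (t.map Prod.fst).Nodup := (List.nodup_cons.mp hnd).2
    have hget : ((PySem.Dict.mk ((k0, v0) :: t)).get? k0) = some v0 := by
      rw [PySem.Dict.get?_mk_cons]; simp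
    have hcongr : ∀ k ∈ t.map Prod.fst,
        ∀ tb : PySem.Dict String String × PySem.Set String,
        (if c k then (tb.1.insert k (((PySem.Dict.mk ((k0, v0) :: t)).get? k).getD ""), tb.2)
         else (tb.1, PySem.Set.add tb.2 k))
        = (if c k then (tb.1.insert k (((PySem.Dict.mk t).get? k).getD ""), tb.2)
           else (tb.1, PySem.Set.add tb.2 k)) := by
      intro k hk tb
      have hne : k0 ≠ k := fun h => hp1 (h ▸ hk)
      rw [PySem.Dict.get?_mk_cons]
      simp [hne]
    by_cases hc : c k0
    · have hfresh' : ∀ k ∈ t.map Prod.fst,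
          (d.insert k0 (((PySem.Dict.mk ((k0, v0) :: t)).get? k0).getD "")).contains k = false := by
        intro k hk
        have hne : k ≠ k0 := fun h => hp1 (h ▸ hk)
        rw [PySem.Dict.contains_insert]
        simp only [Bool.or_eq_false_iff]
        exact ⟨by simpa using hne, hfresh k (by simp [hk])⟩
      have ihs := ih (d.insert k0 (((PySem.Dict.mk ((k0, v0) :: t)).get? k0).getD "")) s hndt hfresh'
      have hnotc : d.contains k0 = false := hfresh k0 (by simp)
      constructor
      · rw [List.map_cons, List.foldl_cons, if_pos hc,
          pv_foldl_congr _ _ _ _ hcongr, ihs.1]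
        simp [PySem.Dict.items_insert, hnotc, hget, hc]
      · rw [List.map_cons, List.foldl_cons, if_pos hc,
          pv_foldl_congr _ _ _ _ hcongr, ihs.2]
        simp [hc]
    · have ihs := ih d (PySem.Set.add s k0) hndt
        (fun k hk => hfresh k (by simp [hk]))
      constructor
      · rw [List.map_cons, List.foldl_cons, if_neg hc,
          pv_foldl_congr _ _ _ _ hcongr, ihs.1]
        simp [hc]
      · rw [List.map_cons, List.foldl_cons, if_neg hc,
          pv_foldl_congr _ _ _ _ hcongr, ihs.2]
        simp [hc, PySem.Set.update_cons]

-- B-side: .pop(k, None) followed by discarding the value is exactly Dict.erase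
lemma popOrKeep_eq_erase (d : PySem.Dict String String) (k : String) :
    (match d.pop? k with
     | some (_, d') => d'
     | none => d) = d.erase k := by
  unfold PySem.Dict.pop?
  cases h : d.get? k with
  | some v => simp
  | none =>
    simp only [Option.map_none]
    apply PySem.Dict.ext
    show d.items = d.items.filter (fun p => !(p.1 == k))
    rw [eq_comm]
    apply List.filter_eq_self.mpr
    intro p hp
    have hk : k ∉ d.keys := (PySem.Dict.get?_eq_none_iff_not_mem_keys d k).mp h
    have : p.1 ∈ d.keys := List.mem_map.mpr ⟨p, hp, rfl⟩
    simp only [Bool.not_eq_eq_eq_not, Bool.not_true, beq_eq_false_iff_ne]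
    exact fun he => hk (he ▸ this)

-- B's deletion loop: folding erase over a key list filters the items
lemma erase_loop (l : List String) :
    ∀ d : PySem.Dict String String,
      (l.foldl (fun d k => d.erase k) d).items
        = d.items.filter (fun p => !(l.contains p.1)) := by
  induction l with
  | nil => intro d; simp
  | cons a t ih =>
    intro d
    rw [List.foldl_cons, ih]
    show (d.items.filter (fun p => !(p.1 == a))).filter (fun p => !(t.contains p.1))
        = d.items.filter (fun p => !((a :: t).contains p.1))
    rw [List.filter_filter]
    apply List.filter_congr
    intro p _
    simp [Bool.and_comm, Bool.beq_eq_decide_eq]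

-- mapping fst past a key-only filter
lemma map_fst_filter (c : String → Bool) (L : List (String × String)) :
    (L.filter (fun p => c p.1)).map Prod.fst = (L.map Prod.fst).filter c := by
  induction L with
  | nil => rfl
  | cons p t ih =>
    by_cases hc : c p.1 <;> simp [List.filter_cons, hc, ih]

-- ===== VERDICT (by name: the statement is the Claim_ definition above) =====
theorem reconcile_countries_by_name_spec : Claim_equal_reconcile_countries_by_name := by
  intro pc gc _ hpre
  unfold Spec_reconcile_countries_by_name
  obtain ⟨hpc, hgc⟩ := hpre
  unfold reconcile_countries_by_name reconcile_countries_by_name_alt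
  simp only [keycopy_eq_map]
  -- A side
  have hloop := check_loop (fun k => (gc.map Prod.fst).contains k) pc
    PySem.Dict.empty PySem.Set.empty hpc
    (by intro k _; exact PySem.Dict.contains_empty k)
  -- B side: the deletion loop
  have hdel : (gc.foldl
      (fun (d : PySem.Dict String String) p =>
        match d.pop? p.1 with
        | some (_, d') => d'
        | none => d)
      (PySem.Dict.mk pc)).items
      = pc.filter (fun p => !((gc.map Prod.fst).contains p.1)) := by
    rw [pv_foldl_congr _ _ (fun (d : PySem.Dict String String) p => d.erase p.1) _
      (fun p _ d => popOrKeep_eq_erase d p.1)]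
    have : gc.foldl (fun (d : PySem.Dict String String) p => d.erase p.1) (PySem.Dict.mk pc)
        = (gc.map Prod.fst).foldl (fun (d : PySem.Dict String String) k => d.erase k)
            (PySem.Dict.mk pc) := by
      rw [List.foldl_map]
    rw [this, erase_loop]
  have hkeys : (gc.foldl
      (fun (d : PySem.Dict String String) p =>
        match d.pop? p.1 with
        | some (_, d') => d'
        | none => d)
      (PySem.Dict.mk pc)).keys
      = (pc.map Prod.fst).filter (fun k => !((gc.map Prod.fst).contains k)) := by
    show (gc.foldl _ (PySem.Dict.mk pc)).items.map Prod.fst = _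
    rw [hdel]
    exact map_fst_filter (fun k => !((gc.map Prod.fst).contains k)) pc
  have hcont : ∀ p ∈ pc,
      (!(gc.foldl
        (fun (d : PySem.Dict String String) p =>
          match d.pop? p.1 with
          | some (_, d') => d'
          | none => d)
        (PySem.Dict.mk pc)).contains p.1) = (gc.map Prod.fst).contains p.1 := by
    intro p hp
    rw [PySem.Dict.contains_eq_decide_mem_keys, hkeys]
    have hmem : p.1 ∈ pc.map Prod.fst := List.mem_map.mpr ⟨p, hp, rfl⟩
    by_cases hg : p.1 ∈ gc.map Prod.fst <;>
      simp [List.contains_eq_mem, List.mem_filter, hmem, hg]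
  rw [Prod.mk.injEq]
  refine ⟨?_, ?_⟩
  · -- table component
    rw [hloop.1]
    have he : (PySem.Dict.empty : PySem.Dict String String).items = [] := rfl
    rw [he, List.nil_append]
    exact (List.filter_congr (fun p hp => (hcont p hp).symm))
  · -- basket component
    rw [hloop.2,
      show (PySem.Set.empty : PySem.Set String) = ([] : List String) from rfl,
      PySem.Set.update_nil_left, hkeys]
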